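-- pv_equiv track=rewrite | github.com/zwx0208/intro-to-computing-notes | 23期末/积木.py | can_spell
-- ===== SOURCE A (Python) =====
-- def can_spell(word, bricks):
--     l = len(word)
--     used = [False] * 4
--     def backtrack(pos):
--         if pos == l:
--             return True
--         for i in range(4):
--             if not used[i] and word[pos] in bricks[i]:
--                 used[i] = True
--                 if backtrack(pos + 1):
--                     return True
--                 used[i] = False
--         return False
--     return backtrack(0)
-- ===== SOURCE B (Python) =====
-- def can_spell(word, bricks):
--     # Bitmask DP over used-brick subsets instead of DFS backtracking.
--     masks = {0}
--     for ch in word: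
--         masks = {m | (1 << i) for m in masks for i in range(4)
--                  if not (m >> i) & 1 and ch in bricks[i]}
--         if not masks:
--             return False
--     return True
-- ===== Notes on version B (the rewrite author's own statement) =====
-- stated objective: alternative
-- what changed: Replaces the recursive DFS backtracking with mutable used-flags by an iterative bitmask dynamic program that carries the set of achievable used-brick subsets through the word.
-- outside the precondition, e.g. on can_spell('a', ['a']): A returns True, B raises IndexError
import Mathlib
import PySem

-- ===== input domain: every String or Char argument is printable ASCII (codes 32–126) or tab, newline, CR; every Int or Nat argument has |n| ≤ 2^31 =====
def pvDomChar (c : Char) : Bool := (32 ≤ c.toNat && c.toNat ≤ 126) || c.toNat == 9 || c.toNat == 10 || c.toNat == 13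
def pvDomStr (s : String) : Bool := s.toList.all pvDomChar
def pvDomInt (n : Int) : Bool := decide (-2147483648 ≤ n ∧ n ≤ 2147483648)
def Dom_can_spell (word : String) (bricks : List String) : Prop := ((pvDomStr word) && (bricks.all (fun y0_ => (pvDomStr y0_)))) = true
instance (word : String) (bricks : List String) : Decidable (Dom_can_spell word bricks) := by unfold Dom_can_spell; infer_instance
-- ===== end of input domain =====

-- B replaces A's recursive DFS backtracking by an iterative bitmask DP over achievable
-- used-brick subsets (alternative decomposition; same return value on all of Pre_).


-- ===== PORT A =====
-- A's nested `backtrack`: recursion over the remaining characters, the for-loop over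
-- range(4) as an or-fold; `used[i] = True … used[i] = False` becomes passing `used.set i true`
-- into the recursive call (the net effect of Python's mutate/undo pair).
def canSpellBt (bricks : List String) : List Char → List Bool → Bool
  | [], _ => true
  | c :: rest, used =>
    (List.range 4).foldl
      (fun acc i =>
        acc || ((!used.getD i false) && ((bricks.getD i "").toList.contains c)
                && canSpellBt bricks rest (used.set i true)))
      false

def can_spell (word : String) (bricks : List String) : Bool :=
  canSpellBt bricks word.toList (List.replicate 4 false)

-- ===== PORT B =====
-- Source B's set comprehension: fold over the current masks, inner fold over range(4),
-- adding m | (1 << i) when brick i is fresh in m and contains the character.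
def canSpellStep (bricks : List String) (c : Char) (masks : PySem.Set Nat) : PySem.Set Nat :=
  masks.foldl
    (fun s m =>
      (List.range 4).foldl
        (fun s i =>
          if ((m >>> i) &&& 1 == 0) && ((bricks.getD i "").toList.contains c)
          then PySem.Set.add s (m ||| (1 <<< i)) else s)
        s)
    PySem.Set.empty

def canSpellDP (bricks : List String) : List Char → PySem.Set Nat → Bool
  | [], _ => true
  | c :: rest, masks =>
    let masks' := canSpellStep bricks c masks
    if masks' = [] then false else canSpellDP bricks rest masks'

def can_spell_alt (word : String) (bricks : List String) : Bool :=
  canSpellDP bricks word.toList (PySem.Set.ofList [0])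

-- ===== PRECONDITION & SPEC =====
-- Pre_ excludes bricks lists shorter than 4 combined with a nonempty word: there A indexes
-- bricks[0..3] and raises IndexError on most such inputs, returning a value only accidentally
-- when an early assignment succeeds before the missing index is touched (B raises there).
def Pre_can_spell (word : String) (bricks : List String) : Prop :=
  word = "" ∨ 4 ≤ bricks.length
instance (word : String) (bricks : List String) : Decidable (Pre_can_spell word bricks) := by
  unfold Pre_can_spell; infer_instance

def pvWitness_can_spell : String × List String := ("ab", ["ax", "b", "c", "d"])

def Spec_can_spell (word : String) (bricks : List String) (out : Bool) : Prop := out = can_spell_alt word bricks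
instance (word : String) (bricks : List String) (out : Bool) : Decidable (Spec_can_spell word bricks out) := by unfold Spec_can_spell; infer_instance

-- ===== CLAIM (what is proved, stated in full; the proofs are below) =====
def Claim_equal_can_spell : Prop := ∀ (word : String) (bricks : List String), Dom_can_spell word bricks → Pre_can_spell word bricks → Spec_can_spell word bricks (can_spell word bricks)

-- ===== LEMMAS AND PROOFS =====

-- the used-flag list encoded by a bitmask
def usedOf (m : Nat) : List Bool := [m.testBit 0, m.testBit 1, m.testBit 2, m.testBit 3]

theorem foldl_or_any (f : Nat → Bool) :
    ∀ (l : List Nat) (b : Bool), List.foldl (fun acc i => acc || f i) b l = (b || l.any f) := by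
  intro l
  induction l with
  | nil => simp
  | cons x xs ih => intro b; simp [List.foldl, ih, Bool.or_assoc]

theorem bt_cons_iff (bricks : List String) (c : Char) (rest : List Char) (used : List Bool) :
    canSpellBt bricks (c :: rest) used = true ↔
      ∃ i < 4, ((!used.getD i false) && ((bricks.getD i "").toList.contains c)
                && canSpellBt bricks rest (used.set i true)) = true := by
  show (List.range 4).foldl _ false = true ↔ _
  rw [foldl_or_any]
  simp [List.any_eq_true, List.mem_range]

theorem and1_bool (m i : Nat) : (((m >>> i) &&& 1 == 0) : Bool) = !m.testBit i := by
  simp only [Nat.testBit, Nat.and_one_is_mod]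
  rcases Nat.mod_two_eq_zero_or_one (m >>> i) with h | h <;> simp [h]

theorem usedOf_getD (m i : Nat) (hi : i < 4) : (usedOf m).getD i false = m.testBit i := by
  interval_cases i <;> rfl

theorem usedOf_set (m i : Nat) (hi : i < 4) :
    usedOf (m ||| (1 <<< i)) = (usedOf m).set i true := by
  have hbit : ∀ j : Nat, (1 <<< i : Nat).testBit j = decide (j = i) := by
    intro j
    rw [Nat.one_shiftLeft]
    by_cases h : j = i
    · simp [h, Nat.testBit_two_pow_self]
    · simp [h, Nat.testBit_two_pow_of_ne (fun he => h he.symm)]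
  interval_cases i <;>
    simp only [usedOf, List.set, Nat.testBit_or, hbit] <;> simp

theorem mem_inner (bricks : List String) (c : Char) (m : Nat) :
    ∀ (l : List Nat) (s : PySem.Set Nat) (x : Nat),
      (x ∈ l.foldl
        (fun s i =>
          if ((m >>> i) &&& 1 == 0) && ((bricks.getD i "").toList.contains c)
          then PySem.Set.add s (m ||| (1 <<< i)) else s) s) ↔
      x ∈ s ∨ ∃ i ∈ l, (((m >>> i) &&& 1 == 0) && ((bricks.getD i "").toList.contains c)) = true
                        ∧ x = m ||| (1 <<< i) := by
  intro l
  induction l with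
  | nil => simp
  | cons j js ih =>
    intro s x
    rw [List.foldl_cons, ih]
    by_cases h : (((m >>> j) &&& 1 == 0) && ((bricks.getD j "").toList.contains c)) = true
    · rw [if_pos h, PySem.Set.mem_add]
      constructor
      · rintro ((hx | rfl) | ⟨i, hi, hc, hx⟩)
        · exact Or.inl hx
        · exact Or.inr ⟨j, List.mem_cons_self .., h, rfl⟩
        · exact Or.inr ⟨i, List.mem_cons_of_mem j hi, hc, hx⟩
      · rintro (hx | ⟨i, hi, hc, hx⟩)
        · exact Or.inl (Or.inl hx)
        · rcases List.mem_cons.mp hi with rfl | hi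
          · exact Or.inl (Or.inr hx)
          · exact Or.inr ⟨i, hi, hc, hx⟩
    · rw [if_neg h]
      constructor
      · rintro (hx | ⟨i, hi, hc, hx⟩)
        · exact Or.inl hx
        · exact Or.inr ⟨i, List.mem_cons_of_mem j hi, hc, hx⟩
      · rintro (hx | ⟨i, hi, hc, hx⟩)
        · exact Or.inl hx
        · rcases List.mem_cons.mp hi with rfl | hi
          · exact absurd hc h
          · exact Or.inr ⟨i, hi, hc, hx⟩

theorem mem_step (bricks : List String) (c : Char) (masks : PySem.Set Nat) (x : Nat) :
    x ∈ canSpellStep bricks c masks ↔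
      ∃ m ∈ masks, ∃ i < 4,
        (((m >>> i) &&& 1 == 0) && ((bricks.getD i "").toList.contains c)) = true
        ∧ x = m ||| (1 <<< i) := by
  unfold canSpellStep
  suffices h : ∀ (ms : List Nat) (s0 : PySem.Set Nat),
      (x ∈ ms.foldl
        (fun s m => (List.range 4).foldl
          (fun s i =>
            if ((m >>> i) &&& 1 == 0) && ((bricks.getD i "").toList.contains c)
            then PySem.Set.add s (m ||| (1 <<< i)) else s) s) s0) ↔
      x ∈ s0 ∨ ∃ m ∈ ms, ∃ i < 4,
        (((m >>> i) &&& 1 == 0) && ((bricks.getD i "").toList.contains c)) = true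
        ∧ x = m ||| (1 <<< i) by
    rw [h masks PySem.Set.empty]
    simp [PySem.Set.empty]
  intro ms
  induction ms with
  | nil => simp
  | cons m ms ih =>
    intro s0
    rw [List.foldl_cons, ih, mem_inner, List.exists_mem_cons_iff]
    simp only [List.mem_range]
    exact or_assoc

theorem main_iff (bricks : List String) :
    ∀ (chars : List Char) (masks : PySem.Set Nat), masks ≠ [] →
      (canSpellDP bricks chars masks = true ↔
        ∃ m ∈ masks, canSpellBt bricks chars (usedOf m) = true) := by
  intro chars
  induction chars with
  | nil =>
    intro masks hne
    rcases List.exists_mem_of_ne_nil masks hne with ⟨m, hm⟩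
    simp [canSpellDP, canSpellBt]
    exact ⟨m, hm⟩
  | cons c rest ih =>
    intro masks hne
    show (if canSpellStep bricks c masks = [] then false else
            canSpellDP bricks rest (canSpellStep bricks c masks)) = true ↔ _
    have hchar : ∀ m, (∃ i < 4,
        (((m >>> i) &&& 1 == 0) && ((bricks.getD i "").toList.contains c)) = true
        ∧ canSpellBt bricks rest (usedOf (m ||| (1 <<< i))) = true) ↔
        canSpellBt bricks (c :: rest) (usedOf m) = true := by
      intro m
      rw [bt_cons_iff]
      refine exists_congr fun i => and_congr_right fun hi => ?_
      rw [and1_bool m i, ← usedOf_getD m i hi, usedOf_set m i hi]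
      simp [Bool.and_eq_true, and_assoc]
    by_cases he : canSpellStep bricks c masks = []
    · rw [if_pos he]
      constructor
      · intro h; cases h
      · rintro ⟨m, hm, hb⟩
        rw [← hchar m] at hb
        rcases hb with ⟨i, hi, hc, _⟩
        have : (m ||| (1 <<< i)) ∈ canSpellStep bricks c masks :=
          (mem_step bricks c masks _).mpr ⟨m, hm, i, hi, hc, rfl⟩
        rw [he] at this
        cases this
    · rw [if_neg he, ih _ he]
      constructor
      · rintro ⟨x, hx, hb⟩
        rcases (mem_step bricks c masks x).mp hx with ⟨m, hm, i, hi, hc, rfl⟩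
        exact ⟨m, hm, (hchar m).mp ⟨i, hi, hc, hb⟩⟩
      · rintro ⟨m, hm, hb⟩
        rcases (hchar m).mpr hb with ⟨i, hi, hc, hrest⟩
        exact ⟨m ||| (1 <<< i), (mem_step bricks c masks _).mpr ⟨m, hm, i, hi, hc, rfl⟩, hrest⟩

-- ===== VERDICT (by name: the statement is the Claim_ definition above) =====
theorem can_spell_spec : Claim_equal_can_spell := by
  intro word bricks _ _
  unfold Spec_can_spell can_spell can_spell_alt
  rw [Bool.eq_iff_iff]
  rw [main_iff bricks word.toList (PySem.Set.ofList [0]) (by decide)]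
  constructor
  · intro hb
    exact ⟨0, by decide, by rw [(by decide : usedOf 0 = List.replicate 4 false)]; exact hb⟩
  · rintro ⟨m, hm, hmb⟩
    have hm0 : m = 0 := by simpa [PySem.Set.mem_ofList] using hm
    subst hm0
    rw [(by decide : usedOf 0 = List.replicate 4 false)] at hmb
    exact hmb
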